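-- pv_equiv track=rewrite | github.com/pypi-data/pypi-mirror-322 | packages/stefutils/stefutils-0.43.5.tar.gz/stefutils-0.43.5/stefutil/prettier/prettier_debug.py | to_rich_markup
-- ===== SOURCE A (Python) =====
-- def _rich_markup_enclose_single(x=None, tag: str = None) -> str:
--     return f'[{tag}]{x}[/{tag}]'
--
-- def to_rich_markup(x=None, fg: str = None, bg: str = None, bold: bool = False, italic: bool = False, underline: bool = False):
--     x = str(x)
--
--     color = []
--     if fg:
--         color.append(fg)
--     if bg:
--         color.append(f'on {bg}')
--     if color:
--         x = _rich_markup_enclose_single(x=x, tag=' '.join(color))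
--
--     for style, tag in [(bold, 'bold'), (italic, 'i'), (underline, 'u')]:
--         if style:
--             x = _rich_markup_enclose_single(x=x, tag=tag)
--     return x
-- ===== SOURCE B (Python) =====
-- def to_rich_markup(x=None, fg: str = None, bg: str = None, bold: bool = False, italic: bool = False, underline: bool = False):
--     color = ' '.join(([fg] if fg else []) + ([f'on {bg}'] if bg else []))
--     tags = [color] if color else []
--     for flag, tag in ((bold, 'bold'), (italic, 'i'), (underline, 'u')):
--         if flag:
--             tags.append(tag)
--     prefix = ''.join(f'[{t}]' for t in reversed(tags))
--     suffix = ''.join(f'[/{t}]' for t in tags)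
--     return prefix + str(x) + suffix
-- ===== Notes on version B (the rewrite author's own statement) =====
-- stated objective: alternative
-- what changed: B collects the active tags into one list in a single pass and assembles the opening-tag prefix and closing-tag suffix once by joining, instead of A's repeated inside-out re-wrapping of the growing string.
import Mathlib
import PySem

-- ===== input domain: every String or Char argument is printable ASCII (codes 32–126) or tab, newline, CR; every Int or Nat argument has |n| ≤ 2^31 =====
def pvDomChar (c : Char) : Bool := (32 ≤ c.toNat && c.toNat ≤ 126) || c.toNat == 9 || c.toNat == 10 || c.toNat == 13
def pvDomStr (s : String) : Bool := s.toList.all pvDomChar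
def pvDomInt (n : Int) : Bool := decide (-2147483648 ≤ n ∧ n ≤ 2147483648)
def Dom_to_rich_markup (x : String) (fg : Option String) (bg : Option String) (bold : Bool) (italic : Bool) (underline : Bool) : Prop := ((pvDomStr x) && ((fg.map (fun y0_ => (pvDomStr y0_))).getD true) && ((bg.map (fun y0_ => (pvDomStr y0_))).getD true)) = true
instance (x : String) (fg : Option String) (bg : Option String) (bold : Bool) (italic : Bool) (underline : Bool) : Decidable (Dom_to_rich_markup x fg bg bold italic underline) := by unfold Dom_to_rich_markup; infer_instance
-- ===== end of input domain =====

-- B collects the active tags once and assembles prefix/suffix in one pass instead of repeatedly re-wrapping; same output, alternative decomposition.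
-- ===== PORT A =====
-- f'[{tag}]{x}[/{tag}]'
def richEnclose (x : String) (tag : String) : String :=
  "[" ++ tag ++ "]" ++ x ++ "[/" ++ tag ++ "]"

def to_rich_markup (x : String) (fg : Option String) (bg : Option String) (bold : Bool) (italic : Bool) (underline : Bool) : String :=
  -- color = []; if fg: color.append(fg); if bg: color.append('on ' + bg)   (Python truthiness: None and '' are falsy)
  let color : List String := []
  let color := match fg with | some s => if s ≠ "" then color ++ [s] else color | none => color
  let color := match bg with | some s => if s ≠ "" then color ++ ["on " ++ s] else color | none => color
  let x := if color ≠ [] then richEnclose x (PySem.Str.join " " color) else x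
  -- for style, tag in [(bold,'bold'),(italic,'i'),(underline,'u')]: if style: x = enclose(x, tag)
  ([(bold, "bold"), (italic, "i"), (underline, "u")] : List (Bool × String)).foldl
    (fun acc st => if st.1 then richEnclose acc st.2 else acc) x

-- ===== PORT B =====
def to_rich_markup_alt (x : String) (fg : Option String) (bg : Option String) (bold : Bool) (italic : Bool) (underline : Bool) : String :=
  let color := PySem.Str.join " "
    ((match fg with | some s => if s ≠ "" then [s] else [] | none => []) ++
     (match bg with | some s => if s ≠ "" then ["on " ++ s] else [] | none => []))
  let tags : List String := if color ≠ "" then [color] else []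
  let tags := ([(bold, "bold"), (italic, "i"), (underline, "u")] : List (Bool × String)).foldl
    (fun acc ft => if ft.1 then acc ++ [ft.2] else acc) tags
  let prefixS := PySem.Str.join "" (tags.reverse.map (fun t => "[" ++ t ++ "]"))
  let suffixS := PySem.Str.join "" (tags.map (fun t => "[/" ++ t ++ "]"))
  prefixS ++ x ++ suffixS

-- ===== PRECONDITION & SPEC =====
def Spec_to_rich_markup (x : String) (fg : Option String) (bg : Option String) (bold : Bool) (italic : Bool) (underline : Bool) (out : String) : Prop := out = to_rich_markup_alt x fg bg bold italic underline
instance (x : String) (fg : Option String) (bg : Option String) (bold : Bool) (italic : Bool) (underline : Bool) (out : String) : Decidable (Spec_to_rich_markup x fg bg bold italic underline out) := by unfold Spec_to_rich_markup; infer_instance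

-- ===== CLAIM (what is proved, stated in full; the proofs are below) =====
def Claim_equal_to_rich_markup : Prop := ∀ (x : String) (fg : Option String) (bg : Option String) (bold : Bool) (italic : Bool) (underline : Bool), Dom_to_rich_markup x fg bg bold italic underline → Spec_to_rich_markup x fg bg bold italic underline (to_rich_markup x fg bg bold italic underline)

-- ===== LEMMAS AND PROOFS =====

-- ===== VERDICT (by name: the statement is the Claim_ definition above) =====
set_option maxHeartbeats 2000000 in
theorem to_rich_markup_spec : Claim_equal_to_rich_markup := by
  intro x fg bg bold italic underline _
  unfold Spec_to_rich_markup to_rich_markup to_rich_markup_alt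
  cases fg <;> cases bg <;> cases bold <;> cases italic <;> cases underline <;>
    simp only [List.foldl, if_true] <;>
    (try split_ifs) <;>
    (apply String.toList_inj.mp) <;>
    simp_all [richEnclose, PySem.Str.join, PySem.Chars.join, List.intercalate]
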